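-- pv_equiv track=rewrite | github.com/galaxygx1983/hengjun-cbi-parser | templates/analyze_timeline.py | parse_sdci_payload
-- ===== SOURCE A (Python) =====
-- def parse_sdci_payload(payload):
--     """解析SDCI载荷（亨均版3字节格式，与CTC源码 ApplySDCIToSDIHJ 一致）
--
--     每个条目3字节：
--     - 前2字节：设备索引（大端序）
--     - 第3字节：设备状态
--     """
--     entries = []
--     for i in range(0, len(payload), 3):
--         if i + 2 >= len(payload):
--             break
--         device_index = (payload[i] << 8) | payload[i + 1]
--         state = payload[i + 2]
--         entries.append((device_index, state))
--     return entries
-- ===== SOURCE B (Python) =====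
-- def parse_sdci_payload(payload):
--     return [((hi << 8) | lo, st)
--             for hi, lo, st in zip(payload[0::3], payload[1::3], payload[2::3])]
-- ===== Notes on version B (the rewrite author's own statement) =====
-- stated objective: idiomatic
-- what changed: Replaces the index-stepping loop with an explicit break by zipping three strided slices (payload[0::3], payload[1::3], payload[2::3]); zip truncation drops the incomplete trailing record.
import Mathlib
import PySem

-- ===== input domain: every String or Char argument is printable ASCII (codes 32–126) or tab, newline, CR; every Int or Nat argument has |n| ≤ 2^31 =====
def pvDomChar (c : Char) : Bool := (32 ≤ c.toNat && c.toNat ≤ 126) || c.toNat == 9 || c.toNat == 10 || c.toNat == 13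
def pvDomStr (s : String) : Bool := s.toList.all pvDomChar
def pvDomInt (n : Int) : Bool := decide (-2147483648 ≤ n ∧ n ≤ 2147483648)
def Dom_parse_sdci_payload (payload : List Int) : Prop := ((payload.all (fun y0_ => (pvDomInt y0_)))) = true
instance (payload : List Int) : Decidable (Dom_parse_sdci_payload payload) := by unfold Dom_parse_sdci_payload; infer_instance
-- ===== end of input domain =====

-- B replaces A's index-stepping loop (with explicit break) by zipping three strided
-- slices payload[0::3]/[1::3]/[2::3]; zip truncation drops the incomplete tail (idiomatic).

-- ===== PORT A =====
-- A's for-loop over range(0, len, 3) with append and break, as structural recursion on the index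
def pvLoopA (payload : List Int) (acc : List (Int × Int)) (i : Nat) : List (Int × Int) :=
  if i < payload.length then
    if payload.length ≤ i + 2 then acc.reverse
    else pvLoopA payload
      ((PySem.Int.bor ((PySem.List.pyGetD payload (i : Int) 0) <<< (8 : Nat))
          (PySem.List.pyGetD payload ((i : Int) + 1) 0),
        PySem.List.pyGetD payload ((i : Int) + 2) 0) :: acc) (i + 3)
  else acc.reverse
termination_by payload.length - i

def parse_sdci_payload (payload : List Int) : List (Int × Int) :=
  pvLoopA payload [] 0

-- ===== PORT B =====
def parse_sdci_payload_alt (payload : List Int) : List (Int × Int) :=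
  (((((PySem.List.slice? payload (some 0) none 3).getD []).zip
      ((PySem.List.slice? payload (some 1) none 3).getD [])).zip
      ((PySem.List.slice? payload (some 2) none 3).getD []))).map
    (fun (p : (Int × Int) × Int) => (PySem.Int.bor (p.1.1 <<< (8 : Nat)) p.1.2, p.2))

-- ===== PRECONDITION & SPEC =====
def Spec_parse_sdci_payload (payload : List Int) (out : List (Int × Int)) : Prop := out = parse_sdci_payload_alt payload
instance (payload : List Int) (out : List (Int × Int)) : Decidable (Spec_parse_sdci_payload payload out) := by unfold Spec_parse_sdci_payload; infer_instance

-- ===== CLAIM (what is proved, stated in full; the proofs are below) =====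
def Claim_equal_parse_sdci_payload : Prop := ∀ (payload : List Int), Dom_parse_sdci_payload payload → Spec_parse_sdci_payload payload (parse_sdci_payload payload)

-- ===== LEMMAS AND PROOFS =====

-- canonical chunked reading of the payload: one entry per complete 3-byte record
def pvChunk3 : List Int → List (Int × Int)
  | a :: b :: c :: r => (PySem.Int.bor (a <<< (8 : Nat)) b, c) :: pvChunk3 r
  | _ => []

theorem pvChunk3_short (l : List Int) (h : l.length ≤ 2) : pvChunk3 l = [] := by
  match l, h with
  | [], _ => rfl
  | [_], _ => rfl
  | [_, _], _ => rfl

-- A's loop from index i computes acc.reverse ++ the chunks of the rest of the payload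
theorem pvLoopA_eq (payload : List Int) (acc : List (Int × Int)) (i : Nat) :
    pvLoopA payload acc i = acc.reverse ++ pvChunk3 (payload.drop i) := by
  unfold pvLoopA
  split
  · rename_i hi
    split
    · rename_i h2
      rw [pvChunk3_short _ (by simp; omega), List.append_nil]
    · rename_i h2
      push Not at h2
      have h0 : i < payload.length := by omega
      have h1 : i + 1 < payload.length := by omega
      rw [pvLoopA_eq]
      rw [List.drop_eq_getElem_cons h0, List.drop_eq_getElem_cons h1,
          List.drop_eq_getElem_cons h2]
      have e0 : PySem.List.pyGetD payload (i : Int) 0 = payload[i] :=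
        PySem.List.pyGetD_ofNat payload i 0 h0
      have e1 : PySem.List.pyGetD payload ((i : Int) + 1) 0 = payload[i + 1] := by
        rw [← PySem.List.pyGetD_ofNat payload (i + 1) 0 h1]; norm_num
      have e2 : PySem.List.pyGetD payload ((i : Int) + 2) 0 = payload[i + 2] := by
        rw [← PySem.List.pyGetD_ofNat payload (i + 2) 0 h2]; norm_num
      rw [e0, e1, e2]
      simp [pvChunk3]
  · rename_i hi
    rw [pvChunk3_short _ (by simp; omega), List.append_nil]
termination_by payload.length - i

-- stride-3 slice of a list with a full leading record: its j-th element, then the stride of the rest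
theorem pvSlice3_cons (j : Nat) (hj : j < 3) (a b c : Int) (r : List Int) :
    PySem.List.slice? (a :: b :: c :: r) (some (j : Int)) none 3 =
      some ((a :: b :: c :: r).getD j 0 ::
        (PySem.List.slice? r (some (j : Int)) none 3).getD []) := by
  have hjlen : j < (a::b::c::r).length := by simp; omega
  simp only [PySem.List.slice?, PySem.List.sliceIndices]
  norm_num
  rw [if_neg (by omega : ¬ ((j:Int) < 0)), if_neg (by omega : ¬ ((j:Int) < 0))]
  rw [(by omega : min (j:Int) (↑r.length + 1 + 1 + 1) = (j:Int))]
  rw [if_pos (by omega : (j:Int) ≤ ↑r.length + 1 + 1)]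
  by_cases hjr : (j:Int) ≤ r.length
  · rw [(by omega : min (j:Int) (↑r.length:Int) = (j:Int))]
    have hcount : ((↑r.length + 1 + 1 + 1 - (j:Int) + 3 - 1) / 3).toNat
        = (if (j:Int) < ↑r.length then (((↑r.length:Int) - ↑j + 3 - 1) / 3).toNat else 0) + 1 := by
      by_cases h : (j:Int) < r.length
      · rw [if_pos h]; omega
      · rw [if_neg h]; omega
    rw [hcount, List.range_succ_eq_map, List.filterMap_cons, List.filterMap_map]
    simp only [Nat.cast_zero, mul_zero, add_zero, Int.toNat_natCast]
    rw [List.getElem?_eq_getElem hjlen]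
    simp only [Option.getD_some]
    congr 1
  · rw [(by omega : min (j:Int) (↑r.length:Int) = (↑r.length:Int))]
    rw [if_neg (by omega : ¬ ((r.length:Int) < ↑r.length))]
    rw [(by omega : ((↑r.length + 1 + 1 + 1 - (j:Int) + 3 - 1) / 3).toNat = 1)]
    simp [List.getElem?_eq_getElem hjlen]

-- B's zip of the three strided slices also computes the chunks
theorem pvAlt_eq (payload : List Int) : parse_sdci_payload_alt payload = pvChunk3 payload := by
  match payload with
  | [] => simp [parse_sdci_payload_alt, PySem.List.slice?, PySem.List.sliceIndices, pvChunk3]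
  | [a] => simp [parse_sdci_payload_alt, PySem.List.slice?, PySem.List.sliceIndices, pvChunk3]
  | [a, b] => simp [parse_sdci_payload_alt, PySem.List.slice?, PySem.List.sliceIndices, pvChunk3]
  | a :: b :: c :: r =>
    have ih := pvAlt_eq r
    have h0 := pvSlice3_cons 0 (by norm_num) a b c r
    have h1 := pvSlice3_cons 1 (by norm_num) a b c r
    have h2 := pvSlice3_cons 2 (by norm_num) a b c r
    norm_num at h0 h1 h2
    simp only [parse_sdci_payload_alt] at ih ⊢
    rw [h0, h1, h2]
    simp only [Option.getD_some, List.zip_cons_cons, List.map_cons, pvChunk3]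
    rw [ih]
termination_by payload.length

-- ===== VERDICT (by name: the statement is the Claim_ definition above) =====
theorem parse_sdci_payload_spec : Claim_equal_parse_sdci_payload := by
  intro payload _
  unfold Spec_parse_sdci_payload parse_sdci_payload
  rw [pvLoopA_eq, pvAlt_eq]
  simp
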